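-- pv_equiv track=rewrite | github.com/code4aLiving/data_structures_algorithms | Excercises/lucky_number_8.py | twoDigitsCube
-- ===== SOURCE A (Python) =====
-- def oneDigitTable(digits):
--     table = [[0 for x in range(10)] for x in range(len(digits))]
--     for i in range(len(digits)):
--         for j in range(10):
--             if j != digits[i]:
--                 if i>0:
--                     table[i][j] = table[i-1][j]
--             else:
--                 if not i:
--                     table[i][j]=1
--                 else:
--                     table[i][j]=table[i-1][j] + 2**i
--
--     return table
--
-- def twoDigitsCube(digits):
--     table = oneDigitTable(digits)
--     cube = [[[0 for x in range(10)] for x in range(10)] for x in range(len(digits))]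
--     for i in range(1,len(digits)):
--         for j in range(10):
--             for k in range(10):
--                 if k != digits[i]:
--                     cube[i][j][k] = cube[i-1][j][k]
--                     continue
--                 cube[i][j][k] = cube[i-1][j][k] + table[i-1][j]
--
--     return cube
-- ===== SOURCE B (Python) =====
-- def twoDigitsCube(digits):
--     # Closed-form counting: layer i is, for each (j, k), the sum of 2**p over
--     # index pairs p < t <= i with digits[p] == j and digits[t] == k.
--     # No one-digit table and no layer-to-layer recurrence.
--     cube = []
--     for i in range(len(digits)):
--         layer = [[0] * 10 for _ in range(10)]
--         for t in range(1, i + 1):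
--             k = digits[t]
--             if 0 <= k < 10:
--                 for p in range(t):
--                     j = digits[p]
--                     if 0 <= j < 10:
--                         layer[j][k] += 2 ** p
--         cube.append(layer)
--     return cube
-- ===== Notes on version B (the rewrite author's own statement) =====
-- stated objective: alternative
-- what changed: B drops A's one-digit DP table and its layer-from-previous-layer recurrence entirely and computes every layer i independently by the closed-form double sum over index pairs p<t<=i, adding 2**p into layer[digits[p]][digits[t]].
import Mathlib
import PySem

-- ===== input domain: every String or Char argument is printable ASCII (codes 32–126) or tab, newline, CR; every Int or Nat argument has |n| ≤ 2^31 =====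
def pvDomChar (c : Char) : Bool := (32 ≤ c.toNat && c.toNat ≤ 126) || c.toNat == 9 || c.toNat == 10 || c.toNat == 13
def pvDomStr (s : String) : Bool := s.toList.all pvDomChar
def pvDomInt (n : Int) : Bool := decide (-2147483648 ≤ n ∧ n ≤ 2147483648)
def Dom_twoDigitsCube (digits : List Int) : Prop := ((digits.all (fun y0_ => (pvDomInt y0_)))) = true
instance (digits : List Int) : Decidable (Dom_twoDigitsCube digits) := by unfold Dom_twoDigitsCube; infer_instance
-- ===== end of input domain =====

-- B replaces A's one-digit DP table and layer-from-previous-layer recurrence by an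
-- independent closed-form count per layer: sum 2^p over index pairs p < t ≤ i into
-- cell (digits[p], digits[t]) (objective: alternative; same return value).

-- ===== PORT A =====
-- Python table[i][j] = v  (indices in range on all uses)
def set2 (t : List (List Int)) (i j : Nat) (v : Int) : List (List Int) :=
  t.set i ((t.getD i []).set j v)

-- Python cube[i][j][k] = v  (indices in range on all uses)
def set3 (c : List (List (List Int))) (i j k : Nat) (v : Int) : List (List (List Int)) :=
  c.set i ((c.getD i []).set j (((c.getD i []).getD j []).set k v))

def oneDigitTable (digits : List Int) : List (List Int) :=
  (List.range digits.length).foldl (fun t i =>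
    (List.range 10).foldl (fun t (j : Nat) =>
      if (j : Int) ≠ digits.getD i 0 then
        (if 0 < i then set2 t i j ((t.getD (i-1) []).getD j 0) else t)
      else
        (if i = 0 then set2 t i j 1
         else set2 t i j ((t.getD (i-1) []).getD j 0 + 2 ^ i))) t)
    (List.replicate digits.length (List.replicate 10 0))

def twoDigitsCube (digits : List Int) : List (List (List Int)) :=
  let table := oneDigitTable digits
  (List.range' 1 (digits.length - 1)).foldl (fun c i =>
    (List.range 10).foldl (fun c (j : Nat) =>
      (List.range 10).foldl (fun c (k : Nat) =>
        if (k : Int) ≠ digits.getD i 0 then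
          set3 c i j k (((c.getD (i-1) []).getD j []).getD k 0)
        else
          set3 c i j k (((c.getD (i-1) []).getD j []).getD k 0
                          + (table.getD (i-1) []).getD j 0)) c) c)
    (List.replicate digits.length (List.replicate 10 (List.replicate 10 0)))

-- ===== PORT B =====
-- Source B: `layer[j][k] += v` for in-range digit indices
def addCell (L : List (List Int)) (j k : Nat) (v : Int) : List (List Int) :=
  L.set j ((L.getD j []).set k ((L.getD j []).getD k 0 + v))

-- Source B: the body of `for i in range(len(digits))` building one layer from scratch
def layerDirect (digits : List Int) (i : Nat) : List (List Int) :=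
  (List.range' 1 i).foldl (fun L t =>
    let k := digits.getD t 0
    if 0 ≤ k ∧ k < 10 then
      (List.range t).foldl (fun L p =>
        let j := digits.getD p 0
        if 0 ≤ j ∧ j < 10 then addCell L j.toNat k.toNat (2 ^ p) else L) L
    else L)
    (List.replicate 10 (List.replicate 10 0))

def twoDigitsCube_alt (digits : List Int) : List (List (List Int)) :=
  (List.range digits.length).map (layerDirect digits)

-- ===== PRECONDITION & SPEC =====
def Spec_twoDigitsCube (digits : List Int) (out : List (List (List Int))) : Prop := out = twoDigitsCube_alt digits
instance (digits : List Int) (out : List (List (List Int))) : Decidable (Spec_twoDigitsCube digits out) := by unfold Spec_twoDigitsCube; infer_instance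

-- ===== CLAIM (what is proved, stated in full; the proofs are below) =====
def Claim_equal_twoDigitsCube : Prop := ∀ (digits : List Int), Dom_twoDigitsCube digits → Spec_twoDigitsCube digits (twoDigitsCube digits)

-- ===== LEMMAS AND PROOFS =====

def z10 : List Int := List.replicate 10 0
def Z10 : List (List Int) := List.replicate 10 z10

theorem pv_z10_getD (i : Nat) (h : i < 10) : z10.getD i 0 = 0 := by
  rw [List.getD_eq_getElem?_getD]
  have hg : z10[i]? = some 0 := by
    unfold z10; rw [List.getElem?_replicate, if_pos h]
  rw [hg]; rfl

theorem pv_Z10_getD (i : Nat) (h : i < 10) : Z10.getD i [] = z10 := by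
  rw [List.getD_eq_getElem?_getD]
  have hg : Z10[i]? = some z10 := by
    unfold Z10; rw [List.getElem?_replicate, if_pos h]
  rw [hg]; rfl

-- the reference one-digit rows of the shared recurrence, one per digit
def bRowStep (row : List Int) (d p : Int) : List Int :=
  if 0 ≤ d ∧ d < 10 then row.set d.toNat (row.getD d.toNat 0 + p) else row

def rowsAux : List Int → List Int → Int → List (List Int)
  | [], _, _ => []
  | d :: ds, cur, p => bRowStep cur d p :: rowsAux ds (bRowStep cur d p) (p * 2)

-- the reference layer step: add row tr into column d of acc
def bLayerStep (acc : List (List Int)) (tr : List Int) (d : Int) : List (List Int) :=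
  if 0 ≤ d ∧ d < 10 then
    (List.range 10).foldl
      (fun a j => a.set j ((a.getD j []).set d.toNat
                             ((a.getD j []).getD d.toNat 0 + tr.getD j 0))) acc
  else acc

-- the reference: layer i of the cube
def layerF (digits : List Int) : Nat → List (List Int)
  | 0 => Z10
  | i+1 => bLayerStep (layerF digits i) ((rowsAux digits z10 1).getD i []) (digits.getD (i+1) 0)

-- small getD/set facts
theorem pv_getD_set_self {α : Type} (l : List α) (i : Nat) (v d : α) (h : i < l.length) :
    (l.set i v).getD i d = v := by
  simp [List.getD_eq_getElem?_getD, List.getElem?_set_self h]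

theorem pv_getD_set_ne {α : Type} (l : List α) {i j : Nat} (v d : α) (h : i ≠ j) :
    (l.set i v).getD j d = l.getD j d := by
  simp [List.getD_eq_getElem?_getD, List.getElem?_set_ne h]

theorem pv_set_getD_self {α : Type} (l : List α) (i : Nat) (d : α) :
    l.set i (l.getD i d) = l := by
  by_cases h : i < l.length
  · have : l.getD i d = l[i] := by simp [List.getD_eq_getElem?_getD, List.getElem?_eq_getElem h]
    rw [this, List.set_getElem_self]
  · exact List.set_eq_of_length_le (by omega)

theorem pv_getD_lt {α : Type} (l : List α) (i : Nat) (d : α) (h : i < l.length) :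
    l.getD i d = l[i] := by
  simp [List.getD_eq_getElem?_getD, List.getElem?_eq_getElem h]

theorem pv_getD_oob {α : Type} (l : List α) (i : Nat) (d : α) (h : l.length ≤ i) :
    l.getD i d = d := by
  simp [List.getD_eq_getElem?_getD, List.getElem?_eq_none_iff.2 h]

theorem pv_set_append_right {α : Type} (l : List α) (m : List α) (k : Nat) (v : α)
    (h : l.length ≤ k) : (l ++ m).set k v = l ++ m.set (k - l.length) v := by
  induction l generalizing k with
  | nil => simp
  | cons a l ih =>
    cases k with
    | zero => simp at h
    | succ k =>
      simp only [List.cons_append, List.set, List.length_cons]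
      rw [ih k (by simpa using h)]
      have he : k + 1 - (l.length + 1) = k - l.length := by omega
      rw [he]

-- writing every cell of a prefix turns a fold of sets into a map
theorem pv_foldW {α : Type} (dflt : α) (h : α → Nat → α) :
    ∀ (n : Nat) (l : List α), n ≤ l.length →
      (List.range n).foldl (fun l j => l.set j (h (l.getD j dflt) j)) l
        = (List.range n).map (fun j => h (l.getD j dflt) j) ++ l.drop n := by
  intro n
  induction n with
  | zero => intro l _; simp
  | succ n ih =>
    intro l hl
    have hn : n < l.length := by omega
    rw [List.range_succ, List.foldl_append, List.map_append, ih l (by omega)]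
    simp only [List.foldl_cons, List.foldl_nil, List.map_cons, List.map_nil]
    have hlen : ((List.range n).map (fun j => h (l.getD j dflt) j)).length = n := by simp
    have hg : (((List.range n).map (fun j => h (l.getD j dflt) j)) ++ l.drop n).getD n dflt
        = l.getD n dflt := by
      rw [List.getD_eq_getElem?_getD, List.getElem?_append_right (by omega)]
      simp [List.getElem?_drop, List.getD_eq_getElem?_getD]
    rw [hg, pv_set_append_right _ _ _ _ (by omega), hlen, Nat.sub_self,
        List.drop_eq_getElem_cons hn, List.set_cons_zero, List.append_assoc,
        List.singleton_append, pv_getD_lt l n dflt hn]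

-- the i = 0 table row: at most one cell is written
theorem pv_onehot (d : Int) :
    ∀ (m : Nat) (t : List (List Int)),
      (List.range m).foldl (fun t (j : Nat) => if (j : Int) = d then set2 t 0 j 1 else t) t
        = if 0 ≤ d ∧ d < (m : Int) then set2 t 0 d.toNat 1 else t := by
  intro m
  induction m with
  | zero =>
    intro t
    simp only [List.range_zero, List.foldl_nil]
    rw [if_neg (by omega)]
  | succ m ih =>
    intro t
    rw [List.range_succ, List.foldl_append, ih]
    by_cases hm : (m : Int) = d
    · rw [if_neg (by omega)]
      have hdt : d.toNat = m := by omega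
      simp only [List.foldl_cons, List.foldl_nil, if_pos hm,
        if_pos (show 0 ≤ d ∧ d < ((m + 1 : Nat) : Int) by omega), hdt]
    · by_cases h0 : 0 ≤ d ∧ d < (m : Int)
      · rw [if_pos h0, if_pos (by omega)]
        simp only [List.foldl_cons, List.foldl_nil, if_neg hm]
      · rw [if_neg h0, if_neg (by omega)]
        simp only [List.foldl_cons, List.foldl_nil, if_neg hm]

-- inner table loop (i > 0): row i collects the writes, other rows untouched
theorem pv_innerRow (i : Nat) (f : List Int → Nat → Int) (hi : 0 < i) :
    ∀ (js : List Nat) (t : List (List Int)), i < t.length →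
      js.foldl (fun t j => set2 t i j (f (t.getD (i-1) []) j)) t
        = t.set i (js.foldl (fun r j => r.set j (f (t.getD (i-1) []) j)) (t.getD i [])) := by
  intro js
  induction js with
  | nil => intro t _; simp only [List.foldl_nil]; rw [pv_set_getD_self]
  | cons j js ih =>
    intro t ht
    simp only [List.foldl_cons]
    set t' := set2 t i j (f (t.getD (i-1) []) j) with ht'
    have hlen : t'.length = t.length := by simp [ht', set2]
    rw [ih t' (by omega)]
    have h1 : t'.getD (i-1) [] = t.getD (i-1) [] := by
      simp only [ht', set2]; exact pv_getD_set_ne _ _ _ (by omega)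
    have h2 : t'.getD i [] = (t.getD i []).set j (f (t.getD (i-1) []) j) := by
      simp only [ht', set2]; exact pv_getD_set_self _ _ _ _ ht
    rw [h1, h2]
    simp [ht', set2, List.set_set]

-- inner cube loop over k (i > 0): row j of layer i collects the writes
theorem pv_inner3 (i j : Nat) (f : List (List Int) → Nat → Int) (hi : 0 < i) :
    ∀ (ks : List Nat) (c : List (List (List Int))), i < c.length →
      ks.foldl (fun c kk => set3 c i j kk (f (c.getD (i-1) []) kk)) c
        = c.set i ((c.getD i []).set j
            (ks.foldl (fun r kk => r.set kk (f (c.getD (i-1) []) kk))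
              ((c.getD i []).getD j []))) := by
  intro ks
  induction ks with
  | nil => intro c _; simp only [List.foldl_nil]; rw [pv_set_getD_self, pv_set_getD_self]
  | cons kk ks ih =>
    intro c hc
    simp only [List.foldl_cons]
    set x := f (c.getD (i-1) []) kk with hx
    set L := c.getD i [] with hL
    set row := L.getD j [] with hrow
    set c' := set3 c i j kk x with hc'
    have hlen : c'.length = c.length := by simp [hc', set3]
    rw [ih c' (by omega)]
    have h1 : c'.getD (i-1) [] = c.getD (i-1) [] := by
      simp only [hc', set3]; exact pv_getD_set_ne _ _ _ (by omega)
    have h2 : c'.getD i [] = L.set j (row.set kk x) := by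
      simp only [hc', set3, ← hL, ← hrow]; exact pv_getD_set_self _ _ _ _ hc
    have h3 : (L.set j (row.set kk x)).getD j [] = row.set kk x := by
      by_cases hj : j < L.length
      · exact pv_getD_set_self _ _ _ _ hj
      · rw [List.set_eq_of_length_le (by omega), pv_getD_oob _ _ _ (by omega)]
        rw [hrow, pv_getD_oob _ _ _ (by omega)]
        simp
    rw [h1, h2, h3]
    simp [hc', set3, List.set_set]

-- both cube loops together (i > 0)
theorem pv_combo (i : Nat) (f : List (List Int) → Nat → Nat → Int) (hi : 0 < i) :
    ∀ (js : List Nat) (c : List (List (List Int))), i < c.length →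
      js.foldl (fun c j =>
          (List.range 10).foldl (fun c kk => set3 c i j kk (f (c.getD (i-1) []) j kk)) c) c
        = c.set i (js.foldl (fun L j =>
            L.set j ((List.range 10).foldl
              (fun r kk => r.set kk (f (c.getD (i-1) []) j kk)) (L.getD j [])))
            (c.getD i [])) := by
  intro js
  induction js with
  | nil => intro c _; simp only [List.foldl_nil]; rw [pv_set_getD_self]
  | cons j js ih =>
    intro c hc
    simp only [List.foldl_cons]
    rw [pv_inner3 i j (fun prev kk => f prev j kk) hi (List.range 10) c hc]
    set L := c.getD i [] with hL
    set r' := (List.range 10).foldl (fun r kk => r.set kk (f (c.getD (i-1) []) j kk)) (L.getD j []) with hr'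
    set c' := c.set i (L.set j r') with hc'
    have hlen : c'.length = c.length := by simp [hc']
    rw [ih c' (by omega)]
    have h1 : c'.getD (i-1) [] = c.getD (i-1) [] := by
      simp only [hc']; exact pv_getD_set_ne _ _ _ (by omega)
    have h2 : c'.getD i [] = L.set j r' := by
      simp only [hc']; exact pv_getD_set_self _ _ _ _ hc
    rw [h1, h2]
    simp [hc', List.set_set]

-- closed row form vs the single-set row step
theorem pv_mapRow (prev : List Int) (d p : Int) (h : prev.length = 10) :
    (List.range 10).map (fun (j : Nat) => if (j : Int) ≠ d then prev.getD j 0 else prev.getD j 0 + p)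
      = bRowStep prev d p := by
  by_cases hd : 0 ≤ d ∧ d < 10
  · unfold bRowStep
    rw [if_pos hd]
    have hdt : ((d.toNat : Int)) = d := Int.toNat_of_nonneg hd.1
    apply List.ext_getElem
    · simp [h]
    · intro n h1 h2
      have hn : n < 10 := by simpa using h1
      have hnp : n < prev.length := by omega
      simp only [List.getElem_map, List.getElem_range, List.getElem_set]
      rw [pv_getD_lt _ _ _ hnp]
      by_cases he : d.toNat = n
      · rw [if_pos he, if_neg (by omega : ¬((n : Int) ≠ d)), he,
            pv_getD_lt _ _ _ (by omega : n < prev.length)]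
      · rw [if_neg he, if_pos (by omega : (n : Int) ≠ d)]
  · unfold bRowStep
    rw [if_neg hd]
    apply List.ext_getElem
    · simp [h]
    · intro n h1 h2
      have hn : n < 10 := by simpa using h1
      simp only [List.getElem_map, List.getElem_range]
      rw [if_pos (by omega : (n : Int) ≠ d), pv_getD_lt _ _ _ (by omega)]

-- shape preservation for the layer step
theorem pv_bLayerStep_shape (acc : List (List Int)) (tr : List Int) (d : Int)
    (h1 : acc.length = 10) (h2 : ∀ r ∈ acc, r.length = 10) :
    (bLayerStep acc tr d).length = 10 ∧ ∀ r ∈ bLayerStep acc tr d, r.length = 10 := by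
  unfold bLayerStep
  split
  · rw [pv_foldW ([] : List Int)
      (fun row j => row.set d.toNat (row.getD d.toNat 0 + tr.getD j 0)) 10 acc (by omega)]
    have hdrop : acc.drop 10 = [] := by
      have := List.drop_length (l := acc); rwa [h1] at this
    rw [hdrop, List.append_nil]
    constructor
    · simp
    · intro r hr
      simp only [List.mem_map, List.mem_range] at hr
      obtain ⟨j, hj, rfl⟩ := hr
      have hm : acc.getD j [] ∈ acc := by
        rw [pv_getD_lt _ _ _ (by omega)]; exact List.getElem_mem _
      rw [List.length_set]
      exact h2 _ hm
  · exact ⟨h1, h2⟩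

theorem pv_layerF_shape (digits : List Int) (i : Nat) :
    (layerF digits i).length = 10 ∧ ∀ r ∈ layerF digits i, r.length = 10 := by
  induction i with
  | zero =>
    constructor
    · simp [layerF, Z10]
    · intro r hr; simp [layerF, Z10] at hr; simp [hr, z10]
  | succ i ih => exact pv_bLayerStep_shape _ _ _ ih.1 ih.2

-- closed layer form vs the layer step
theorem pv_mapLayer (prev : List (List Int)) (tr : List Int) (d : Int)
    (h1 : prev.length = 10) (h2 : ∀ r ∈ prev, r.length = 10) :
    (List.range 10).map (fun (j : Nat) => (List.range 10).map (fun (kk : Nat) =>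
        if (kk : Int) ≠ d then (prev.getD j []).getD kk 0
        else (prev.getD j []).getD kk 0 + tr.getD j 0))
      = bLayerStep prev tr d := by
  have hrow : ∀ j, j < 10 → (prev.getD j []).length = 10 := by
    intro j hj
    have : prev.getD j [] ∈ prev := by
      rw [pv_getD_lt _ _ _ (by omega)]; exact List.getElem_mem _
    exact h2 _ this
  by_cases hd : 0 ≤ d ∧ d < 10
  · unfold bLayerStep
    rw [if_pos hd]
    rw [pv_foldW ([] : List Int)
      (fun row j => row.set d.toNat (row.getD d.toNat 0 + tr.getD j 0)) 10 prev (by omega)]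
    have hdrop : prev.drop 10 = [] := by
      have := List.drop_length (l := prev); rwa [h1] at this
    rw [hdrop, List.append_nil]
    apply List.map_congr_left
    intro j hj
    have hj10 : j < 10 := by simpa using hj
    rw [pv_mapRow _ d (tr.getD j 0) (hrow j hj10)]
    unfold bRowStep
    rw [if_pos hd]
  · unfold bLayerStep
    rw [if_neg hd]
    apply List.ext_getElem
    · simp [h1]
    · intro n hn1 hn2
      have hn : n < 10 := by simpa using hn1
      simp only [List.getElem_map, List.getElem_range]
      rw [pv_mapRow _ d (tr.getD n 0) (hrow n hn)]
      unfold bRowStep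
      rw [if_neg hd, pv_getD_lt _ _ _ (by omega)]

-- facts about the shared row recurrence
theorem pv_bRowStep_length (cur : List Int) (d p : Int) :
    (bRowStep cur d p).length = cur.length := by
  unfold bRowStep; split <;> simp

theorem pv_rowsAux_length (ds : List Int) : ∀ cur p, (rowsAux ds cur p).length = ds.length := by
  induction ds with
  | nil => intro cur p; simp [rowsAux]
  | cons d ds ih => intro cur p; simp [rowsAux, ih]

theorem pv_rowsAux_mem_length (ds : List Int) :
    ∀ cur p, cur.length = 10 → ∀ r ∈ rowsAux ds cur p, r.length = 10 := by
  induction ds with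
  | nil => intro cur p _ r hr; simp [rowsAux] at hr
  | cons d ds ih =>
    intro cur p hc r hr
    simp only [rowsAux, List.mem_cons] at hr
    rcases hr with rfl | hr
    · rw [pv_bRowStep_length]; exact hc
    · exact ih _ _ (by rw [pv_bRowStep_length]; exact hc) r hr

theorem pv_rowsAux_getD (ds : List Int) :
    ∀ cur p k, k < ds.length →
      (rowsAux ds cur p).getD k []
        = bRowStep (if k = 0 then cur else (rowsAux ds cur p).getD (k-1) [])
            (ds.getD k 0) (p * 2 ^ k) := by
  induction ds with
  | nil => intro cur p k h; simp at h
  | cons d ds ih =>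
    intro cur p k hk
    cases k with
    | zero => simp [rowsAux]
    | succ k =>
      have hk' : k < ds.length := by simpa using hk
      simp only [rowsAux, List.getD_cons_succ]
      rw [ih _ (p*2) k hk']
      have hp : p * 2 * 2 ^ k = p * 2 ^ (k+1) := by ring
      rw [hp]
      congr 1
      cases k with
      | zero => simp
      | succ k => simp

-- ==== A's table equals the shared recurrence ====
theorem pv_tableA_inv (digits : List Int) :
    ∀ k, k ≤ digits.length →
      (List.range k).foldl (fun t i =>
        (List.range 10).foldl (fun t (j : Nat) =>
          if (j : Int) ≠ digits.getD i 0 then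
            (if 0 < i then set2 t i j ((t.getD (i-1) []).getD j 0) else t)
          else
            (if i = 0 then set2 t i j 1
             else set2 t i j ((t.getD (i-1) []).getD j 0 + 2 ^ i))) t)
        (List.replicate digits.length (List.replicate 10 0))
      = (rowsAux digits z10 1).take k
          ++ List.replicate (digits.length - k) (List.replicate 10 0) := by
  intro k
  induction k with
  | zero => intro _; simp
  | succ k ih =>
    intro hk
    rw [List.range_succ (n := k), List.foldl_append, ih (by omega)]
    simp only [List.foldl_cons, List.foldl_nil]
    have hRlen : (rowsAux digits z10 1).length = digits.length :=
      pv_rowsAux_length digits z10 1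
    have htake : ((rowsAux digits z10 1).take k).length = k := by
      rw [List.length_take, hRlen]; omega
    by_cases hk0 : k = 0
    · subst hk0
      have hfun : (fun (t : List (List Int)) (j : Nat) =>
            if (j : Int) ≠ digits.getD 0 0 then
              (if 0 < 0 then set2 t 0 j ((t.getD (0-1) []).getD j 0) else t)
            else
              (if 0 = 0 then set2 t 0 j 1
               else set2 t 0 j ((t.getD (0-1) []).getD j 0 + 2 ^ 0)))
          = fun (t : List (List Int)) (j : Nat) =>
              if (j : Int) = digits.getD 0 0 then set2 t 0 j 1 else t := by
        funext t j
        by_cases h : (j : Int) = digits.getD 0 0 <;> simp [h]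
      rw [hfun, pv_onehot]
      simp only [Nat.cast_ofNat]
      have hR0 : (rowsAux digits z10 1).getD 0 [] = bRowStep z10 (digits.getD 0 0) 1 := by
        have h := pv_rowsAux_getD digits z10 1 0 (by omega)
        simpa using h
      have htake1 : (rowsAux digits z10 1).take 1 = [bRowStep z10 (digits.getD 0 0) 1] := by
        rw [List.take_add_one, List.take_zero, List.nil_append,
            List.getElem?_eq_getElem (by rw [hRlen]; omega)]
        simp only [Option.toList_some]
        rw [← pv_getD_lt _ _ [] (by rw [hRlen]; omega), hR0]
      rw [htake1]
      have hrep : List.replicate (digits.length - 0) (List.replicate 10 (0:Int))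
          = List.replicate 10 (0:Int)
              :: List.replicate (digits.length - 1) (List.replicate 10 (0:Int)) := by
        have he : digits.length - 0 = (digits.length - 1) + 1 := by omega
        rw [he, List.replicate_succ]
      unfold bRowStep
      by_cases hdr : 0 ≤ digits.getD 0 0 ∧ digits.getD 0 0 < 10
      · rw [if_pos hdr, if_pos hdr]
        have hz : z10.getD (digits.getD 0 0).toNat 0 = 0 :=
          pv_z10_getD _ (by omega)
        rw [hz, hrep]
        simp [set2, z10]
      · rw [if_neg hdr, if_neg hdr, hrep]
        simp [z10]
    · have hkpos : 0 < k := Nat.pos_of_ne_zero hk0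
      have hfun : (fun (t : List (List Int)) (j : Nat) =>
            if (j : Int) ≠ digits.getD k 0 then
              (if 0 < k then set2 t k j ((t.getD (k-1) []).getD j 0) else t)
            else
              (if k = 0 then set2 t k j 1
               else set2 t k j ((t.getD (k-1) []).getD j 0 + 2 ^ k)))
          = fun (t : List (List Int)) (j : Nat) =>
              set2 t k j (if (j : Int) ≠ digits.getD k 0 then (t.getD (k-1) []).getD j 0
                          else (t.getD (k-1) []).getD j 0 + 2 ^ k) := by
        funext t j
        by_cases h : (j : Int) = digits.getD k 0
        · rw [if_neg (not_not_intro h), if_neg (not_not_intro h), if_neg hk0]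
        · rw [if_pos h, if_pos h, if_pos hkpos]
      rw [hfun]
      have hTlen : ((rowsAux digits z10 1).take k
          ++ List.replicate (digits.length - k) (List.replicate 10 (0:Int))).length
            = digits.length := by
        rw [List.length_append, htake, List.length_replicate]; omega
      rw [pv_innerRow k
        (fun prev j => if (j : Int) ≠ digits.getD k 0 then prev.getD j 0
                       else prev.getD j 0 + 2 ^ k) hkpos (List.range 10) _
        (by rw [hTlen]; omega)]
      have tgetk : ((rowsAux digits z10 1).take k
          ++ List.replicate (digits.length - k) (List.replicate 10 (0:Int))).getD k []
            = List.replicate 10 (0:Int) := by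
        rw [List.getD_eq_getElem?_getD, List.getElem?_append_right htake.le, htake,
            Nat.sub_self, List.getElem?_replicate, if_pos (by omega)]
        rfl
      have tgetk1 : ((rowsAux digits z10 1).take k
          ++ List.replicate (digits.length - k) (List.replicate 10 (0:Int))).getD (k-1) []
            = (rowsAux digits z10 1).getD (k-1) [] := by
        rw [List.getD_eq_getElem?_getD, List.getElem?_append_left (by rw [htake]; omega),
            List.getElem?_take, if_pos (by omega), ← List.getD_eq_getElem?_getD]
      rw [tgetk, tgetk1]
      rw [pv_foldW (0 : Int)
        (fun _ j => if (j : Int) ≠ digits.getD k 0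
                    then ((rowsAux digits z10 1).getD (k-1) []).getD j 0
                    else ((rowsAux digits z10 1).getD (k-1) []).getD j 0 + 2 ^ k)
        10 (List.replicate 10 (0:Int)) (by simp)]
      have hdrop : (List.replicate 10 (0:Int)).drop 10 = [] := by simp
      rw [hdrop, List.append_nil]
      have hprev : ((rowsAux digits z10 1).getD (k-1) []).length = 10 := by
        apply pv_rowsAux_mem_length digits z10 1 (by simp [z10])
        rw [pv_getD_lt _ _ _ (by rw [hRlen]; omega)]
        exact List.getElem_mem _
      rw [pv_mapRow _ _ _ hprev]
      have hRk : (rowsAux digits z10 1).getD k []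
          = bRowStep ((rowsAux digits z10 1).getD (k-1) []) (digits.getD k 0) (2 ^ k) := by
        have h := pv_rowsAux_getD digits z10 1 k (by omega)
        rw [if_neg hk0] at h
        simpa using h
      rw [← hRk]
      rw [pv_set_append_right _ _ _ _ htake.le, htake, Nat.sub_self]
      have hrep : List.replicate (digits.length - k) (List.replicate 10 (0:Int))
          = List.replicate 10 (0:Int)
              :: List.replicate (digits.length - k - 1) (List.replicate 10 (0:Int)) := by
        have he : digits.length - k = (digits.length - k - 1) + 1 := by omega
        conv_lhs => rw [he]
        rw [List.replicate_succ]
      rw [hrep, List.set_cons_zero, List.take_add_one,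
          List.getElem?_eq_getElem (by rw [hRlen]; omega)]
      simp only [Option.toList_some]
      rw [← pv_getD_lt _ _ [] (by rw [hRlen]; omega)]
      have he2 : digits.length - (k+1) = digits.length - k - 1 := by omega
      rw [he2]
      simp [List.append_assoc]

theorem pv_tableA_eq (digits : List Int) :
    oneDigitTable digits = rowsAux digits z10 1 := by
  unfold oneDigitTable
  rw [pv_tableA_inv digits digits.length (le_refl _)]
  rw [Nat.sub_self]
  have h := pv_rowsAux_length digits z10 1
  simp [← h]

-- computing one whole layer of A's double loop
theorem pv_layerCompute (prev : List (List Int)) (tr : List Int) (d : Int)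
    (h1 : prev.length = 10) (h2 : ∀ r ∈ prev, r.length = 10) :
    (List.range 10).foldl (fun L (j : Nat) => L.set j ((List.range 10).foldl
        (fun r (kk : Nat) => r.set kk (if (kk : Int) ≠ d then (prev.getD j []).getD kk 0
          else (prev.getD j []).getD kk 0 + tr.getD j 0)) (L.getD j []))) Z10
      = bLayerStep prev tr d := by
  rw [pv_foldW ([] : List Int) (fun row j => (List.range 10).foldl
      (fun r kk => r.set kk (if (kk : Int) ≠ d then (prev.getD j []).getD kk 0
        else (prev.getD j []).getD kk 0 + tr.getD j 0)) row) 10 Z10 (by simp [Z10])]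
  have hdrop : Z10.drop 10 = [] := by simp [Z10]
  rw [hdrop, List.append_nil, ← pv_mapLayer prev tr d h1 h2]
  apply List.map_congr_left
  intro j hj
  have hj10 : j < 10 := by simpa using hj
  rw [pv_Z10_getD j hj10, pv_foldW (0 : Int) (fun _ kk => if (kk : Int) ≠ d then (prev.getD j []).getD kk 0
      else (prev.getD j []).getD kk 0 + tr.getD j 0) 10 z10 (by simp [z10])]
  simp [z10]

-- ==== A's cube equals the layerF layers ====
theorem pv_cubeA_inv (digits : List Int) (hn : 1 ≤ digits.length) :
    ∀ m, m + 1 ≤ digits.length →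
      ((List.range' 1 m).foldl (fun c i =>
        (List.range 10).foldl (fun c (j : Nat) =>
          (List.range 10).foldl (fun c (k : Nat) =>
            if (k : Int) ≠ digits.getD i 0 then
              set3 c i j k (((c.getD (i-1) []).getD j []).getD k 0)
            else
              set3 c i j k (((c.getD (i-1) []).getD j []).getD k 0
                              + ((rowsAux digits z10 1).getD (i-1) []).getD j 0)) c) c)
        (List.replicate digits.length (List.replicate 10 (List.replicate 10 0))))
      = (List.range (m+1)).map (layerF digits)
          ++ List.replicate (digits.length - (m+1)) Z10 := by
  intro m
  induction m with
  | zero =>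
    intro _
    simp only [List.range'_zero, List.foldl_nil]
    have hZ : List.replicate 10 (List.replicate 10 (0:Int)) = Z10 := rfl
    rw [hZ]
    have he : digits.length = (digits.length - 1) + 1 := by omega
    conv_lhs => rw [he]
    rw [List.replicate_succ]
    simp [layerF]
  | succ m ih =>
    intro hm
    rw [List.range'_concat, List.foldl_append, ih (by omega)]
    simp only [List.foldl_cons, List.foldl_nil]
    have h1m : 1 + 1 * m = m + 1 := by omega
    rw [h1m]
    have hmap : ((List.range (m+1)).map (layerF digits)).length = m + 1 := by simp
    have hClen : ((List.range (m+1)).map (layerF digits)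
        ++ List.replicate (digits.length - (m+1)) Z10).length = digits.length := by
      rw [List.length_append, hmap, List.length_replicate]; omega
    have hinner : ∀ (j : Nat), (fun (c : List (List (List Int))) (kk : Nat) =>
          if (kk : Int) ≠ digits.getD (m+1) 0 then
            set3 c (m+1) j kk (((c.getD (m+1-1) []).getD j []).getD kk 0)
          else
            set3 c (m+1) j kk (((c.getD (m+1-1) []).getD j []).getD kk 0
              + ((rowsAux digits z10 1).getD (m+1-1) []).getD j 0))
        = fun c kk => set3 c (m+1) j kk
            ((fun (prev : List (List Int)) (j : Nat) (kk : Nat) =>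
              if (kk : Int) ≠ digits.getD (m+1) 0 then (prev.getD j []).getD kk 0
              else (prev.getD j []).getD kk 0
                + ((rowsAux digits z10 1).getD (m+1-1) []).getD j 0)
              (c.getD (m+1-1) []) j kk) := by
      intro j; funext c kk
      beta_reduce
      by_cases h : (kk : Int) = digits.getD (m+1) 0
      · rw [if_neg (not_not_intro h), if_neg (not_not_intro h)]
      · rw [if_pos h, if_pos h]
    simp only [hinner]
    rw [pv_combo (m+1)
      (fun (prev : List (List Int)) (j : Nat) (kk : Nat) =>
        if (kk : Int) ≠ digits.getD (m+1) 0 then (prev.getD j []).getD kk 0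
        else (prev.getD j []).getD kk 0
          + ((rowsAux digits z10 1).getD (m+1-1) []).getD j 0)
      (by omega) (List.range 10) _
      (by rw [hClen]; omega)]
    simp only [Nat.add_sub_cancel]
    have cgetprev : ((List.range (m+1)).map (layerF digits)
        ++ List.replicate (digits.length - (m+1)) Z10).getD m [] = layerF digits m := by
      rw [List.getD_eq_getElem?_getD, List.getElem?_append_left (by rw [hmap]; omega),
          List.getElem?_eq_getElem (by simp)]
      simp
    have cgetk : ((List.range (m+1)).map (layerF digits)
        ++ List.replicate (digits.length - (m+1)) Z10).getD (m+1) [] = Z10 := by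
      rw [List.getD_eq_getElem?_getD, List.getElem?_append_right hmap.le, hmap,
          Nat.sub_self, List.getElem?_replicate, if_pos (by omega)]
      rfl
    rw [cgetprev, cgetk,
        pv_layerCompute (layerF digits m) ((rowsAux digits z10 1).getD m [])
          (digits.getD (m+1) 0) (pv_layerF_shape digits m).1 (pv_layerF_shape digits m).2]
    rw [show bLayerStep (layerF digits m) ((rowsAux digits z10 1).getD m [])
          (digits.getD (m+1) 0) = layerF digits (m+1) from rfl]
    rw [pv_set_append_right _ _ _ _ hmap.le, hmap, Nat.sub_self]
    have hrep : List.replicate (digits.length - (m+1)) Z10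
        = Z10 :: List.replicate (digits.length - (m+1) - 1) Z10 := by
      have he : digits.length - (m+1) = (digits.length - (m+1) - 1) + 1 := by omega
      conv_lhs => rw [he]
      rw [List.replicate_succ]
    rw [hrep, List.set_cons_zero]
    have he2 : digits.length - (m+1+1) = digits.length - (m+1) - 1 := by omega
    rw [he2, List.range_succ (n := m+1), List.map_append]
    simp [List.append_assoc]

-- ==== B's direct layers equal the layerF layers ====

-- the map form of "add row r into column k"
def colAddMap (L : List (List Int)) (k : Nat) (r : List Int) : List (List Int) :=
  (List.range 10).map (fun j => (L.getD j []).set k ((L.getD j []).getD k 0 + r.getD j 0))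

-- the one-digit row after the first t digits
def rowUpTo (digits : List Int) (t : Nat) : List Int :=
  (List.range t).foldl (fun r p => bRowStep r (digits.getD p 0) (2 ^ p)) z10

theorem pv_rowUpTo_length (digits : List Int) (t : Nat) : (rowUpTo digits t).length = 10 := by
  induction t with
  | zero => simp [rowUpTo, z10]
  | succ t ih =>
    unfold rowUpTo at *
    rw [List.range_succ, List.foldl_append]
    simp only [List.foldl_cons, List.foldl_nil]
    rw [pv_bRowStep_length]; exact ih

theorem pv_rowUpTo_succ (digits : List Int) (t : Nat) :
    rowUpTo digits (t+1) = bRowStep (rowUpTo digits t) (digits.getD t 0) (2 ^ t) := by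
  unfold rowUpTo
  rw [List.range_succ, List.foldl_append]
  simp

theorem pv_rowUpTo_eq_rowsAux (digits : List Int) :
    ∀ t, t < digits.length → rowUpTo digits (t+1) = (rowsAux digits z10 1).getD t [] := by
  intro t
  induction t with
  | zero =>
    intro ht
    have h := pv_rowsAux_getD digits z10 1 0 ht
    rw [pv_rowUpTo_succ]
    simpa [rowUpTo] using h.symm
  | succ t ih =>
    intro ht
    have h := pv_rowsAux_getD digits z10 1 (t+1) ht
    rw [if_neg (by omega)] at h
    simp only [Nat.add_sub_cancel, one_mul] at h
    rw [pv_rowUpTo_succ, ih (by omega)]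
    exact h.symm

theorem pv_colAddMap_zero (L : List (List Int)) (k : Nat) (h1 : L.length = 10) :
    colAddMap L k z10 = L := by
  apply List.ext_getElem
  · simp [colAddMap, h1]
  · intro n hn1 hn2
    have hn : n < 10 := by simp [colAddMap] at hn1; omega
    simp only [colAddMap, List.getElem_map, List.getElem_range]
    rw [pv_z10_getD n hn, add_zero, pv_set_getD_self, pv_getD_lt _ _ _ (by omega)]

-- the exchange: one more cell write folds into the accumulated row
theorem pv_addCell_colAddMap (L : List (List Int)) (k j : Nat) (r : List Int) (v : Int)
    (h1 : L.length = 10) (h2 : ∀ row ∈ L, row.length = 10) (hr : r.length = 10)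
    (hj : j < 10) (hk : k < 10) :
    addCell (colAddMap L k r) j k v = colAddMap L k (r.set j (r.getD j 0 + v)) := by
  have hrowlen : ∀ n, n < 10 → (L.getD n []).length = 10 := by
    intro n hn
    have : L.getD n [] ∈ L := by
      rw [pv_getD_lt _ _ _ (by omega)]; exact List.getElem_mem _
    exact h2 _ this
  have hMlen : (colAddMap L k r).length = 10 := by simp [colAddMap]
  have hMj : (colAddMap L k r).getD j []
      = (L.getD j []).set k ((L.getD j []).getD k 0 + r.getD j 0) := by
    rw [pv_getD_lt _ _ _ (by omega)]
    simp [colAddMap]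
  unfold addCell
  rw [hMj]
  have hset : (((L.getD j []).set k ((L.getD j []).getD k 0 + r.getD j 0)).getD k 0)
      = (L.getD j []).getD k 0 + r.getD j 0 :=
    pv_getD_set_self _ _ _ _ (by rw [hrowlen j hj]; omega)
  rw [hset, List.set_set]
  apply List.ext_getElem
  · simp [colAddMap]
  · intro n hn1 hn2
    have hn : n < 10 := by rw [List.length_set, hMlen] at hn1; omega
    by_cases hnj : n = j
    · subst hnj
      rw [List.getElem_set_self (by simp [colAddMap]; omega)]
      simp only [colAddMap, List.getElem_map, List.getElem_range]
      rw [pv_getD_set_self _ _ _ _ (by omega), add_assoc]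
    · rw [List.getElem_set_ne (by omega)]
      simp only [colAddMap, List.getElem_map, List.getElem_range]
      rw [pv_getD_set_ne _ _ _ (by omega)]

-- B's inner p-loop accumulates exactly the one-digit row into column k
theorem pv_innerDirect (digits : List Int) (kI : Int) (hk : 0 ≤ kI ∧ kI < 10) :
    ∀ (t : Nat) (L : List (List Int)), L.length = 10 → (∀ row ∈ L, row.length = 10) →
      (List.range t).foldl (fun L p =>
          if 0 ≤ digits.getD p 0 ∧ digits.getD p 0 < 10 then
            addCell L (digits.getD p 0).toNat kI.toNat (2 ^ p) else L) L
        = colAddMap L kI.toNat (rowUpTo digits t) := by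
  intro t
  induction t with
  | zero =>
    intro L h1 _
    simp only [List.range_zero, List.foldl_nil]
    rw [show rowUpTo digits 0 = z10 from rfl, pv_colAddMap_zero L _ h1]
  | succ t ih =>
    intro L h1 h2
    rw [List.range_succ, List.foldl_append, ih L h1 h2]
    simp only [List.foldl_cons, List.foldl_nil]
    rw [pv_rowUpTo_succ]
    by_cases hd : 0 ≤ digits.getD t 0 ∧ digits.getD t 0 < 10
    · rw [if_pos hd]
      rw [pv_addCell_colAddMap L kI.toNat (digits.getD t 0).toNat (rowUpTo digits t) (2 ^ t)
            h1 h2 (pv_rowUpTo_length digits t) (by omega) (by omega)]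
      unfold bRowStep
      rw [if_pos hd]
    · rw [if_neg hd]
      unfold bRowStep
      rw [if_neg hd]

-- the layer step in map form
theorem pv_bLayerStep_map (L : List (List Int)) (tr : List Int) (d : Int)
    (h1 : L.length = 10) (hd : 0 ≤ d ∧ d < 10) :
    bLayerStep L tr d = colAddMap L d.toNat tr := by
  unfold bLayerStep
  rw [if_pos hd]
  rw [pv_foldW ([] : List Int)
    (fun row j => row.set d.toNat (row.getD d.toNat 0 + tr.getD j 0)) 10 L (by omega)]
  have hdrop : L.drop 10 = [] := by
    have := List.drop_length (l := L); rwa [h1] at this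
  rw [hdrop, List.append_nil]
  rfl

theorem pv_layerDirect_eq (digits : List Int) :
    ∀ i, i < digits.length → layerDirect digits i = layerF digits i := by
  intro i
  induction i with
  | zero => intro _; simp [layerDirect, layerF, Z10, z10]
  | succ i ih =>
    intro hi
    unfold layerDirect
    rw [List.range'_concat, List.foldl_append]
    have hL : (List.range' 1 i).foldl _ (List.replicate 10 (List.replicate 10 0))
        = layerF digits i := ih (by omega)
    rw [show (List.replicate 10 (List.replicate 10 (0:Int))) = Z10 from rfl] at hL ⊢
    rw [hL]
    simp only [List.foldl_cons, List.foldl_nil]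
    have h1i : 1 + 1 * i = i + 1 := by omega
    rw [h1i]
    show (if 0 ≤ digits.getD (i+1) 0 ∧ digits.getD (i+1) 0 < 10 then
        (List.range (i+1)).foldl (fun L p =>
          if 0 ≤ digits.getD p 0 ∧ digits.getD p 0 < 10 then
            addCell L (digits.getD p 0).toNat (digits.getD (i+1) 0).toNat (2 ^ p) else L)
          (layerF digits i)
      else layerF digits i) = layerF digits (i+1)
    have hshape := pv_layerF_shape digits i
    by_cases hd : 0 ≤ digits.getD (i+1) 0 ∧ digits.getD (i+1) 0 < 10
    · rw [if_pos hd, pv_innerDirect digits _ hd (i+1) _ hshape.1 hshape.2]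
      show colAddMap (layerF digits i) (digits.getD (i+1) 0).toNat (rowUpTo digits (i+1))
          = layerF digits (i+1)
      rw [pv_rowUpTo_eq_rowsAux digits i (by omega)]
      rw [show layerF digits (i+1) = bLayerStep (layerF digits i)
            ((rowsAux digits z10 1).getD i []) (digits.getD (i+1) 0) from rfl]
      rw [pv_bLayerStep_map _ _ _ hshape.1 hd]
    · rw [if_neg hd]
      rw [show layerF digits (i+1) = bLayerStep (layerF digits i)
            ((rowsAux digits z10 1).getD i []) (digits.getD (i+1) 0) from rfl]
      unfold bLayerStep
      rw [if_neg hd]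

-- the two ports agree
theorem pv_cube_eq (digits : List Int) : twoDigitsCube digits = twoDigitsCube_alt digits := by
  by_cases h0 : digits.length = 0
  · simp [twoDigitsCube, twoDigitsCube_alt, h0]
  · have hn : 1 ≤ digits.length := by omega
    have hA := pv_cubeA_inv digits hn (digits.length - 1) (by omega)
    have he : digits.length - 1 + 1 = digits.length := by omega
    rw [he] at hA
    have hB : twoDigitsCube_alt digits = (List.range digits.length).map (layerF digits) := by
      unfold twoDigitsCube_alt
      apply List.map_congr_left
      intro i hi
      exact pv_layerDirect_eq digits i (by simpa using hi)
    simp only [twoDigitsCube, pv_tableA_eq]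
    rw [hA, hB]
    simp

-- ===== VERDICT (by name: the statement is the Claim_ definition above) =====
theorem twoDigitsCube_spec : Claim_equal_twoDigitsCube := by
  intro digits _
  unfold Spec_twoDigitsCube
  exact pv_cube_eq digits
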